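-- pv_equiv track=rewrite | github.com/Aravindswamymajjuri/github_status | user_profile/profile_utils.py | calculate_filtered_metrics
-- ===== SOURCE A (Python) =====
-- from typing import Any, Dict, List, Optional
--
-- def calculate_filtered_metrics(
--     commits: List[Dict[str, Any]], issues: List[Dict[str, Any]], mrs: List[Dict[str, Any]]
-- ) -> Dict[str, int]:
--     """
--     Calculate metrics from filtered data.
--
--     Args:
--         commits: Filtered list of processed commits
--         issues: Filtered list of processed issues
--         mrs: Filtered list of processed merge requests
--
--     Returns:
--         Dictionary containing metrics
--     """
--     morning_commits = len([c for c in commits if (c.get("slot") or "").lower() == "morning"])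
--     afternoon_commits = len([c for c in commits if (c.get("slot") or "").lower() == "afternoon"])
--
--     # Count MR and issue states
--     mr_open = len([m for m in mrs if (m.get("state") or "").lower() == "opened"])
--     mr_closed = len([m for m in mrs if (m.get("state") or "").lower() == "closed"])
--     mr_merged = len([m for m in mrs if (m.get("state") or "").lower() == "merged"])
--
--     issue_open = len([i for i in issues if (i.get("state") or "").lower() == "opened"])
--     issue_closed = len([i for i in issues if (i.get("state") or "").lower() == "closed"])
--
--     return {
--         "total_commits": len(commits),
--         "morning_commits": morning_commits,
--         "afternoon_commits": afternoon_commits,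
--         "total_issues": len(issues),
--         "issue_open": issue_open,
--         "issue_closed": issue_closed,
--         "total_mrs": len(mrs),
--         "mr_open": mr_open,
--         "mr_closed": mr_closed,
--         "mr_merged": mr_merged,
--     }
-- ===== SOURCE B (Python) =====
-- def calculate_filtered_metrics(commits, issues, mrs):
--     def tally(items, key):
--         counts = {}
--         for k in ((d.get(key) or "").lower() for d in items):
--             counts[k] = counts.get(k, 0) + 1
--         return counts
--
--     slot = tally(commits, "slot")
--     istate = tally(issues, "state")
--     mstate = tally(mrs, "state")
--     return {
--         "total_commits": len(commits),
--         "morning_commits": slot.get("morning", 0),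
--         "afternoon_commits": slot.get("afternoon", 0),
--         "total_issues": len(issues),
--         "issue_open": istate.get("opened", 0),
--         "issue_closed": istate.get("closed", 0),
--         "total_mrs": len(mrs),
--         "mr_open": mstate.get("opened", 0),
--         "mr_closed": mstate.get("closed", 0),
--         "mr_merged": mstate.get("merged", 0),
--     }
-- ===== Notes on version B (the rewrite author's own statement) =====
-- stated objective: simpler
-- what changed: Replaces A's seven separate filtered list comprehensions (two to three passes per input list) with a single tally pass per list building a dict keyed on the normalized slot/state, then reads each category out of the tally with .get(key, 0).
import Mathlib
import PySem

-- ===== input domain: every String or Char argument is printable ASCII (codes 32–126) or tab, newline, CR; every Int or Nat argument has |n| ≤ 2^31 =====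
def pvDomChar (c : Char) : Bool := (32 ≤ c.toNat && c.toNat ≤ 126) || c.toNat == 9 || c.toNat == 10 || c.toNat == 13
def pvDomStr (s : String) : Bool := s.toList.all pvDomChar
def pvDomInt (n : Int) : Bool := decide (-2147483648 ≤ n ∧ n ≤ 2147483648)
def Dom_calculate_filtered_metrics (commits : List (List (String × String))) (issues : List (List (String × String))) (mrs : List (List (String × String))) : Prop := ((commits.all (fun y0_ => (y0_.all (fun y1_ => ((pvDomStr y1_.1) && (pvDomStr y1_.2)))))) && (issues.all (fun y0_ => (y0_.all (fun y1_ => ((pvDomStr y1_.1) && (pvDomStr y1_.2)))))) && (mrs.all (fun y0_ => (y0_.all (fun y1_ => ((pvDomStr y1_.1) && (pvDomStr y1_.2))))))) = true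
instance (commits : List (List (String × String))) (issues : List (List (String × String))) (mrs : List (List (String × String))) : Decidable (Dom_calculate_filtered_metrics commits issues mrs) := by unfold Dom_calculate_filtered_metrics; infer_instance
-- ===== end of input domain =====

-- B replaces A's seven filtered scans by one tally pass per list into a dict plus lookups (simpler decomposition).
-- ===== PORT A =====
-- (c.get(key) or "").lower() — missing key or empty value normalizes to ""
def pvNorm (key : String) (d : List (String × String)) : String :=
  PySem.Str.lower (((PySem.Dict.ofList d).get? key).getD "")

def calculate_filtered_metrics (commits : List (List (String × String))) (issues : List (List (String × String))) (mrs : List (List (String × String))) : List (String × Int) :=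
  let morning_commits := (commits.filter (fun c => pvNorm "slot" c == "morning")).length
  let afternoon_commits := (commits.filter (fun c => pvNorm "slot" c == "afternoon")).length
  let mr_open := (mrs.filter (fun m => pvNorm "state" m == "opened")).length
  let mr_closed := (mrs.filter (fun m => pvNorm "state" m == "closed")).length
  let mr_merged := (mrs.filter (fun m => pvNorm "state" m == "merged")).length
  let issue_open := (issues.filter (fun i => pvNorm "state" i == "opened")).length
  let issue_closed := (issues.filter (fun i => pvNorm "state" i == "closed")).length
  [("total_commits", (commits.length : Int)),
   ("morning_commits", (morning_commits : Int)),
   ("afternoon_commits", (afternoon_commits : Int)),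
   ("total_issues", (issues.length : Int)),
   ("issue_open", (issue_open : Int)),
   ("issue_closed", (issue_closed : Int)),
   ("total_mrs", (mrs.length : Int)),
   ("mr_open", (mr_open : Int)),
   ("mr_closed", (mr_closed : Int)),
   ("mr_merged", (mr_merged : Int))]

-- ===== PORT B =====
-- tally(items, key): one pass building counts[k] = counts.get(k, 0) + 1 over normalized keys
def pvTally (key : String) (items : List (List (String × String))) : PySem.Dict String Int :=
  (items.map (pvNorm key)).foldl (fun d k => d.modify k 0 (· + 1)) PySem.Dict.empty

def calculate_filtered_metrics_alt (commits : List (List (String × String))) (issues : List (List (String × String))) (mrs : List (List (String × String))) : List (String × Int) :=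
  let slot := pvTally "slot" commits
  let istate := pvTally "state" issues
  let mstate := pvTally "state" mrs
  [("total_commits", (commits.length : Int)),
   ("morning_commits", slot.getD "morning" 0),
   ("afternoon_commits", slot.getD "afternoon" 0),
   ("total_issues", (issues.length : Int)),
   ("issue_open", istate.getD "opened" 0),
   ("issue_closed", istate.getD "closed" 0),
   ("total_mrs", (mrs.length : Int)),
   ("mr_open", mstate.getD "opened" 0),
   ("mr_closed", mstate.getD "closed" 0),
   ("mr_merged", mstate.getD "merged" 0)]

-- ===== PRECONDITION & SPEC =====
def Spec_calculate_filtered_metrics (commits : List (List (String × String))) (issues : List (List (String × String))) (mrs : List (List (String × String))) (out : List (String × Int)) : Prop := out = calculate_filtered_metrics_alt commits issues mrs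
instance (commits : List (List (String × String))) (issues : List (List (String × String))) (mrs : List (List (String × String))) (out : List (String × Int)) : Decidable (Spec_calculate_filtered_metrics commits issues mrs out) := by unfold Spec_calculate_filtered_metrics; infer_instance

-- ===== CLAIM (what is proved, stated in full; the proofs are below) =====
def Claim_equal_calculate_filtered_metrics : Prop := ∀ (commits : List (List (String × String))) (issues : List (List (String × String))) (mrs : List (List (String × String))), Dom_calculate_filtered_metrics commits issues mrs → Spec_calculate_filtered_metrics commits issues mrs (calculate_filtered_metrics commits issues mrs)

-- ===== LEMMAS AND PROOFS =====
theorem pvTally_getD (key v : String) (items : List (List (String × String))) :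
    (pvTally key items).getD v 0 = ((items.filter (fun c => pvNorm key c == v)).length : Int) := by
  unfold pvTally
  rw [PySem.Dict.getD_foldl_modify_add_one]
  simp [List.count_eq_countP, List.countP_eq_length_filter, List.filter_map]
  rfl

-- ===== VERDICT (by name: the statement is the Claim_ definition above) =====
theorem calculate_filtered_metrics_spec : Claim_equal_calculate_filtered_metrics := by
  intro commits issues mrs _
  unfold Spec_calculate_filtered_metrics
  simp only [calculate_filtered_metrics, calculate_filtered_metrics_alt, pvTally_getD]
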